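-- pv_equiv track=rewrite | github.com/sabrinakhuntia99/multienzyme_optimization | proteo_sim.py | cleave_with_enzyme
-- ===== SOURCE A (Python) =====
-- def cleave_with_enzyme(sequence, enzymes):
--     cleavage_sites = [0]  # Start with the beginning of the sequence
--
--     # Find cleavage sites for each enzyme
--     for enzyme in enzymes:
--         for i in range(len(sequence)):
--             if sequence[i] in enzyme:
--                 cleavage_sites.append(i + 1)  # Add 1 because we want the position after the cleavage site
--
--     # Sort and remove duplicates from cleavage sites
--     cleavage_sites = sorted(set(cleavage_sites))
--
--     # Generate cleaved peptides
--     cleaved_peptides = [sequence[cleavage_sites[i]:cleavage_sites[i + 1]] for i in range(len(cleavage_sites) - 1)]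
--
--     # Add the last peptide
--     cleaved_peptides.append(sequence[cleavage_sites[-1]:])
--
--     return cleaved_peptides
-- ===== SOURCE B (Python) =====
-- def cleave_with_enzyme(sequence, enzymes):
--     # One streaming pass: grow a buffer, emit it after each matching residue.
--     peptides = []
--     current = ''
--     for ch in sequence:
--         current += ch
--         if any(ch in enzyme for enzyme in enzymes):
--             peptides.append(current)
--             current = ''
--     peptides.append(current)
--     return peptides
-- ===== Notes on version B (the rewrite author's own statement) =====
-- stated objective: faster
-- what changed: A materializes a per-enzyme table of all cut positions, sorts and deduplicates it, then re-slices the sequence by index pairs; B keeps no position table at all and makes one streaming pass with a growing peptide buffer that is emitted after each matching residue.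
import Mathlib
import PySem

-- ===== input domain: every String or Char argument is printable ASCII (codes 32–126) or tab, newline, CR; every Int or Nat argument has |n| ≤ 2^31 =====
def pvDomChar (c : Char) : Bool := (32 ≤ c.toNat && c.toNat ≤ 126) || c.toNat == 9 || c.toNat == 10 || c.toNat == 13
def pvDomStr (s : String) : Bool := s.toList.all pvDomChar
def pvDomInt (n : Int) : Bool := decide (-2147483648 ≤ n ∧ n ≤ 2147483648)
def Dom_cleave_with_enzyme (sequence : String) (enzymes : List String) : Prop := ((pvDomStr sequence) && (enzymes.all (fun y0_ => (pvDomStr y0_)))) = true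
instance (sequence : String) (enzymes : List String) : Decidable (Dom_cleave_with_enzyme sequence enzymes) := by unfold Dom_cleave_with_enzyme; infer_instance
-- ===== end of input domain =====

-- B replaces A's cut-position table + sorted(set) + index slicing by a single streaming pass with a
-- peptide buffer, removing the table and the sort (measured faster in a timing run); return values proved equal on the whole domain.

-- ===== PORT A =====
def cleave_with_enzyme (sequence : String) (enzymes : List String) : List String :=
  -- cleavage_sites = [0]; for enzyme in enzymes: for i in range(len(sequence)): if sequence[i] in enzyme: append(i+1)
  let cleavage_sites₀ : List Int :=
    enzymes.foldl (fun acc enzyme =>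
      (PySem.List.pyRange 0 (PySem.Str.len sequence)).foldl (fun acc2 i =>
        if PySem.Chars.isIn [PySem.List.pyGetD sequence.toList i ' '] enzyme.toList
        then acc2 ++ [i + 1] else acc2) acc) [0]
  -- cleavage_sites = sorted(set(cleavage_sites))
  let cleavage_sites : List Int :=
    PySem.List.sorted (PySem.Set.ofList cleavage_sites₀) (fun x => x)
  -- [sequence[cs[i]:cs[i+1]] for i in range(len(cs)-1)]
  let cleaved_peptides : List String :=
    (PySem.List.pyRange 0 ((cleavage_sites.length : Int) - 1)).map (fun i =>
      PySem.Str.slice sequence (some (PySem.List.pyGetD cleavage_sites i 0))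
                               (some (PySem.List.pyGetD cleavage_sites (i + 1) 0)))
  -- append sequence[cs[-1]:]
  cleaved_peptides ++ [PySem.Str.slice sequence (some (PySem.List.pyGetD cleavage_sites (-1) 0)) none]

-- ===== PORT B =====
def cleave_with_enzyme_alt (sequence : String) (enzymes : List String) : List String :=
  -- one pass: the current buffer grows char by char and is emitted after each matching residue
  -- (buffer kept as List Char; Python's string += is exact concatenation of the code points)
  let r := sequence.toList.foldl (fun (st : List String × List Char) ch =>
      let cur := st.2 ++ [ch]
      if enzymes.any (fun enzyme => PySem.Chars.isIn [ch] enzyme.toList)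
      then (st.1 ++ [String.ofList cur], [])
      else (st.1, cur)) ([], [])
  r.1 ++ [String.ofList r.2]

-- ===== PRECONDITION & SPEC =====
def Spec_cleave_with_enzyme (sequence : String) (enzymes : List String) (out : List String) : Prop := out = cleave_with_enzyme_alt sequence enzymes
instance (sequence : String) (enzymes : List String) (out : List String) : Decidable (Spec_cleave_with_enzyme sequence enzymes out) := by unfold Spec_cleave_with_enzyme; infer_instance

-- ===== CLAIM (what is proved, stated in full; the proofs are below) =====
def Claim_equal_cleave_with_enzyme : Prop := ∀ (sequence : String) (enzymes : List String), Dom_cleave_with_enzyme sequence enzymes → Spec_cleave_with_enzyme sequence enzymes (cleave_with_enzyme sequence enzymes)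

-- ===== LEMMAS AND PROOFS =====

/-- the residue-matching predicate shared by both programs: `ch in enzyme` for some enzyme. -/
def pvQ (enzymes : List String) (c : Char) : Bool :=
  enzymes.any (fun enzyme => PySem.Chars.isIn [c] enzyme.toList)

/-- 1-based positions-after-match of the residues of `l` matched by `q`, in increasing order. -/
def pvCuts (q : Char → Bool) : List Char → List Nat
  | [] => []
  | c :: l => if q c then 1 :: (pvCuts q l).map (· + 1) else (pvCuts q l).map (· + 1)

/-- the peptides cut out of `l` by the ascending cut positions `a :: ns`. -/
def pvPieces (l : List Char) (a : Nat) : List Nat → List (List Char)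
  | [] => [l.drop a]
  | b :: ms => (l.drop a).take (b - a) :: pvPieces l b ms

theorem pvCuts_mem (q : Char → Bool) (l : List Char) (x : Nat) :
    x ∈ pvCuts q l ↔ ∃ k, k < l.length ∧ x = k + 1 ∧ q (l.getD k ' ') = true := by
  induction l generalizing x with
  | nil => simp [pvCuts]
  | cons c l ih =>
    simp only [pvCuts]
    constructor
    · intro hx
      split at hx
      · rcases List.mem_cons.1 hx with h1 | h1
        · exact ⟨0, by simp, h1, by simpa⟩
        · rcases List.mem_map.1 h1 with ⟨m, hm, rfl⟩
          rcases (ih m).1 hm with ⟨k, hk, rfl, hq⟩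
          exact ⟨k + 1, by simp only [List.length_cons]; omega, rfl, by simpa using hq⟩
      · rcases List.mem_map.1 hx with ⟨m, hm, rfl⟩
        rcases (ih m).1 hm with ⟨k, hk, rfl, hq⟩
        exact ⟨k + 1, by simp only [List.length_cons]; omega, rfl, by simpa using hq⟩
    · rintro ⟨k, hk, rfl, hq⟩
      cases k with
      | zero =>
        simp only [List.getD_cons_zero] at hq
        simp [hq]
      | succ k =>
        have hk' : k < l.length := by simp only [List.length_cons] at hk; omega
        have hmem : k + 1 + 1 ∈ (pvCuts q l).map (· + 1) :=
          List.mem_map.2 ⟨k + 1, (ih _).2 ⟨k, hk', rfl, by simpa using hq⟩, rfl⟩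
        split <;> simp [hmem]

theorem pvCuts_pos (q : Char → Bool) (l : List Char) : ∀ x ∈ pvCuts q l, 1 ≤ x := by
  intro x hx
  rcases (pvCuts_mem q l x).1 hx with ⟨k, _, rfl, _⟩
  omega

theorem pvCuts_pairwise (q : Char → Bool) (l : List Char) :
    (pvCuts q l).Pairwise (· < ·) := by
  induction l with
  | nil => simp [pvCuts]
  | cons c l ih =>
    have hmap : ((pvCuts q l).map (· + 1)).Pairwise (· < ·) :=
      (List.pairwise_map).2 (ih.imp (by omega))
    by_cases hq : q c
    · simp only [pvCuts, hq, if_pos]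
      refine List.pairwise_cons.2 ⟨?_, hmap⟩
      intro y hy
      rcases List.mem_map.1 hy with ⟨m, hm, rfl⟩
      have := pvCuts_pos q l m hm
      omega
    · simpa [pvCuts, hq] using hmap

/-- shifting every cut position and prepending a char leaves the pieces unchanged. -/
theorem pvPieces_shift (c : Char) (l : List Char) :
    ∀ (ms : List Nat) (a : Nat), pvPieces (c :: l) (a + 1) (ms.map (· + 1)) = pvPieces l a ms := by
  intro ms
  induction ms with
  | nil => intro a; simp [pvPieces]
  | cons b ms ih =>
    intro a
    have hab : b + 1 - (a + 1) = b - a := by omega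
    simp only [List.map_cons, pvPieces, List.drop_succ_cons, ih, hab]

theorem pvPieces_hit (c : Char) (l : List Char) (ms : List Nat) :
    pvPieces (c :: l) 0 (1 :: ms.map (· + 1)) = [c] :: pvPieces l 0 ms := by
  have hsh : pvPieces (c :: l) 1 (ms.map (· + 1)) = pvPieces l 0 ms := pvPieces_shift c l ms 0
  simp only [pvPieces, List.drop_zero, Nat.sub_zero, hsh]
  rfl

theorem pvPieces_miss (c : Char) (l : List Char) (m : Nat) (ms : List Nat) :
    pvPieces (c :: l) 0 ((m :: ms).map (· + 1)) = (c :: l.take m) :: pvPieces l m ms := by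
  have hsh : pvPieces (c :: l) (m + 1) (ms.map (· + 1)) = pvPieces l m ms := pvPieces_shift c l ms m
  simp only [List.map_cons, pvPieces, List.drop_zero, Nat.sub_zero, hsh, List.take_succ_cons]

theorem pvPieces_cons_self (l : List Char) (a : Nat) (ms : List Nat) :
    pvPieces l a ms = (pvPieces l a ms).headI :: (pvPieces l a ms).tail := by
  cases ms <;> simp [pvPieces]

/-- B's streaming recursion. -/
def pvRes (q : Char → Bool) (cur : List Char) : List Char → List (List Char)
  | [] => [cur]
  | c :: l => if q c then (cur ++ [c]) :: pvRes q [] l else pvRes q (cur ++ [c]) l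

theorem pvRes_pieces (q : Char → Bool) :
    ∀ (l cur : List Char),
      pvRes q cur l =
        (cur ++ (pvPieces l 0 (pvCuts q l)).headI) :: (pvPieces l 0 (pvCuts q l)).tail := by
  intro l
  induction l with
  | nil => intro cur; simp [pvRes, pvPieces, pvCuts]
  | cons c l ih =>
    intro cur
    by_cases hq : q c
    · rw [show pvRes q cur (c :: l) = (cur ++ [c]) :: pvRes q [] l by simp [pvRes, hq]]
      rw [ih [], show pvCuts q (c :: l) = 1 :: (pvCuts q l).map (· + 1) by simp [pvCuts, hq]]
      rw [pvPieces_hit]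
      simp only [List.headI_cons, List.tail_cons, List.nil_append]
      rw [← pvPieces_cons_self]
    · rw [show pvRes q cur (c :: l) = pvRes q (cur ++ [c]) l by simp [pvRes, hq]]
      rw [ih (cur ++ [c]), show pvCuts q (c :: l) = (pvCuts q l).map (· + 1) by simp [pvCuts, hq]]
      cases h : pvCuts q l with
      | nil => simp [pvPieces]
      | cons m ms =>
        rw [pvPieces_miss]
        simp [pvPieces]

theorem pvFold_res (q : Char → Bool) (mk : List Char → String) :
    ∀ (l : List Char) (acc : List String) (cur : List Char),
      (l.foldl (fun (st : List String × List Char) ch =>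
          if q ch then (st.1 ++ [mk (st.2 ++ [ch])], []) else (st.1, st.2 ++ [ch])) (acc, cur)).1
        ++ [mk ((l.foldl (fun (st : List String × List Char) ch =>
          if q ch then (st.1 ++ [mk (st.2 ++ [ch])], []) else (st.1, st.2 ++ [ch])) (acc, cur)).2)]
      = acc ++ (pvRes q cur l).map mk := by
  intro l
  induction l with
  | nil => intro acc cur; simp [pvRes]
  | cons c l ih =>
    intro acc cur
    by_cases hq : q c
    · rw [show pvRes q cur (c :: l) = (cur ++ [c]) :: pvRes q [] l by simp [pvRes, hq]]
      rw [List.foldl_cons, if_pos hq, ih]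
      simp
    · rw [show pvRes q cur (c :: l) = pvRes q (cur ++ [c]) l by simp [pvRes, hq]]
      rw [List.foldl_cons, if_neg hq]
      exact ih acc (cur ++ [c])

/-- A's index-sliced peptide list over ascending natural cut positions `a :: ns` is `pvPieces`. -/
theorem pvPiecesA (l : List Char) :
    ∀ (ns : List Nat) (a : Nat),
      ((List.range ns.length).map (fun k =>
          String.ofList (PySem.Chars.slice l (some (((a :: ns).getD k 0 : Nat) : Int))
                                           (some (((a :: ns).getD (k + 1) 0 : Nat) : Int)))))
        ++ [String.ofList (PySem.Chars.slice l (some (((a :: ns).getLast (by simp) : Nat) : Int)) none)]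
      = (pvPieces l a ns).map String.ofList := by
  intro ns
  induction ns with
  | nil =>
    intro a
    simp [pvPieces, PySem.List.slice_from_natCast]
  | cons b ns ih =>
    intro a
    rw [List.length_cons, List.range_succ_eq_map]
    simp only [List.map_cons, List.map_map]
    have hlast : ((a :: b :: ns).getLast (by simp)) = ((b :: ns).getLast (by simp)) :=
      List.getLast_cons (by simp)
    rw [hlast]
    have htail :
        (List.map ((fun k =>
            String.ofList (PySem.Chars.slice l (some (((a :: b :: ns).getD k 0 : Nat) : Int))
                                             (some (((a :: b :: ns).getD (k + 1) 0 : Nat) : Int)))) ∘ Nat.succ)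
          (List.range ns.length))
        = (List.range ns.length).map (fun k =>
            String.ofList (PySem.Chars.slice l (some (((b :: ns).getD k 0 : Nat) : Int))
                                             (some (((b :: ns).getD (k + 1) 0 : Nat) : Int)))) := by
      apply List.map_congr_left
      intro k _
      rfl
    rw [List.cons_append, htail, ih b]
    simp [pvPieces, PySem.List.slice_natCast]

/-- A's sorted-set of cut positions is `0 ::` the cast of `pvCuts`. -/
theorem pvSorted_sites (sequence : String) (enzymes : List String) :
    PySem.List.sorted (PySem.Set.ofList
      (enzymes.foldl (fun acc enzyme =>
        (PySem.List.pyRange 0 (PySem.Str.len sequence)).foldl (fun acc2 i =>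
          if PySem.Chars.isIn [PySem.List.pyGetD sequence.toList i ' '] enzyme.toList
          then acc2 ++ [i + 1] else acc2) acc) [0])) (fun x => x)
    = (0 : Int) :: (pvCuts (pvQ enzymes) sequence.toList).map (fun m : Nat => (m : Int)) := by
  have hpair : ((0 : Int) :: (pvCuts (pvQ enzymes) sequence.toList).map (fun m : Nat => (m : Int))).Pairwise (· < ·) := by
    refine List.pairwise_cons.2 ⟨?_, ?_⟩
    · intro y hy
      rcases List.mem_map.1 hy with ⟨m, hm, rfl⟩
      have h1 := pvCuts_pos (pvQ enzymes) sequence.toList m hm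
      exact_mod_cast h1
    · refine List.pairwise_map.2 ?_
      refine (pvCuts_pairwise (pvQ enzymes) sequence.toList).imp ?_
      intro a b h
      exact_mod_cast h
  apply PySem.List.sorted_eq_of_perm_of_pairwise_lt
  · rw [List.perm_ext_iff_of_nodup (hpair.imp ne_of_lt) (PySem.Set.nodup_ofList _)]
    intro y
    rw [PySem.Set.mem_ofList]
    simp only [PySem.List.foldl_append_if, PySem.List.foldl_append_eq_flatMap]
    simp only [List.mem_cons, List.mem_map, List.mem_append,
      List.mem_flatMap, List.mem_filter, pvCuts_mem, pvQ, List.any_eq_true,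
      PySem.Str.len_eq, PySem.List.pyRange_zero_natCast]
    constructor
    · rintro (rfl | ⟨m, ⟨k, hk, rfl, e, he, hin⟩, rfl⟩)
      · exact Or.inl (Or.inl rfl)
      · refine Or.inr ⟨e, he, (k : Int), ⟨⟨k, List.mem_range.2 hk, rfl⟩, ?_⟩, by push_cast; ring⟩
        rwa [PySem.List.pyGetD_natCast]
    · rintro ((rfl | h) | ⟨e, he, i, ⟨⟨k, hk, rfl⟩, hin⟩, rfl⟩)
      · exact Or.inl rfl
      · simp at h
      · rw [PySem.List.pyGetD_natCast] at hin
        exact Or.inr ⟨k + 1, ⟨k, List.mem_range.1 hk, rfl, e, he, hin⟩, by push_cast; ring⟩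
  · exact hpair

theorem pv_main (sequence : String) (enzymes : List String) :
    cleave_with_enzyme sequence enzymes = cleave_with_enzyme_alt sequence enzymes := by
  have hB : cleave_with_enzyme_alt sequence enzymes
      = (pvRes (pvQ enzymes) [] sequence.toList).map String.ofList := by
    have h := pvFold_res (pvQ enzymes) String.ofList sequence.toList [] []
    simpa [cleave_with_enzyme_alt, pvQ] using h
  have hA : cleave_with_enzyme sequence enzymes
      = (pvPieces sequence.toList 0 (pvCuts (pvQ enzymes) sequence.toList)).map String.ofList := by
    simp only [cleave_with_enzyme]
    rw [pvSorted_sites]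
    have h1 : ((0 : Int) :: (pvCuts (pvQ enzymes) sequence.toList).map (fun m : Nat => (m : Int)))
        = (((0:Nat) :: pvCuts (pvQ enzymes) sequence.toList).map (fun m : Nat => (m : Int))) := by simp
    rw [h1]
    set ns := pvCuts (pvQ enzymes) sequence.toList with hns
    have hlen : (((((0:Nat) :: ns).map (fun m : Nat => (m : Int))).length : Int)) - 1 = (ns.length : Int) := by
      simp
    rw [hlen, PySem.List.pyRange_zero_natCast]
    have e1 : ∀ j : Nat, PySem.List.pyGetD (((0:Nat) :: ns).map (fun m : Nat => (m:Int))) (j : Int) 0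
        = ((((0:Nat) :: ns).getD j 0 : Nat) : Int) := by
      intro j
      rw [PySem.List.pyGetD_natCast]
      exact List.getD_map _ _ _
    have hmaps :
        (List.map (fun m : Nat => (m : Int)) (List.range ns.length)).map
            (fun i => PySem.Str.slice sequence
              (some (PySem.List.pyGetD (((0:Nat) :: ns).map (fun m : Nat => (m:Int))) i 0))
              (some (PySem.List.pyGetD (((0:Nat) :: ns).map (fun m : Nat => (m:Int))) (i + 1) 0)))
        = (List.range ns.length).map (fun k =>
            String.ofList (PySem.Chars.slice sequence.toList
              (some ((((0:Nat) :: ns).getD k 0 : Nat) : Int))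
              (some ((((0:Nat) :: ns).getD (k + 1) 0 : Nat) : Int)))) := by
      rw [List.map_map]
      apply List.map_congr_left
      intro k _
      simp only [Function.comp_apply]
      have e2 : ((k : Int) + 1) = ((k + 1 : Nat) : Int) := by push_cast; ring
      rw [e2, e1, e1]
      rfl
    rw [hmaps]
    have hlast : PySem.List.pyGetD (((0:Nat) :: ns).map (fun m : Nat => (m:Int))) (-1) 0
        = ((((0:Nat) :: ns).getLast (by simp) : Nat) : Int) := by
      rw [PySem.List.pyGetD_neg_one _ _ (by simp)]
      exact List.getLast_map _
    rw [hlast]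
    have hfinal := pvPiecesA sequence.toList ns 0
    exact hfinal
  rw [hA, hB, pvRes_pieces]
  simp only [List.nil_append]
  conv_rhs => rw [← pvPieces_cons_self]

-- ===== VERDICT (by name: the statement is the Claim_ definition above) =====
theorem cleave_with_enzyme_spec : Claim_equal_cleave_with_enzyme := by
  intro sequence enzymes _
  exact pv_main sequence enzymes
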